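-- pv_equiv track=rewrite | github.com/QQQYang/MG-Net | qaoa_dataset.py | graph2hc
-- ===== SOURCE A (Python) =====
-- def graph2hc(graph_edges, n_node):
--     jump2edge = {}
--     circuit_edges = []
--     for edge in graph_edges:
--         if abs(edge[1] - edge[0]) not in jump2edge:
--             jump2edge[abs(edge[1] - edge[0])] = [edge]
--         else:
--             jump2edge[abs(edge[1] - edge[0])].append(edge)
--     qubit_start_idx, node_idx2qubit_idx = {}, {}
--     for i in range(n_node):
--         qubit_start_idx[i] = i
--         node_idx2qubit_idx[i] = [i]
--     node_idx = n_node
--     keys = sorted(list(jump2edge.keys()))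
--     for jump in keys:
--         for edge in jump2edge[jump]:
--             circuit_edges.append([qubit_start_idx[edge[0]], node_idx])
--             circuit_edges.append([qubit_start_idx[edge[1]], node_idx])
--             node_idx2qubit_idx[node_idx] = [edge[0], edge[1]]
--             qubit_start_idx[edge[0]] = node_idx
--             qubit_start_idx[edge[1]] = node_idx
--             node_idx += 1
--     for i in range(n_node):
--         circuit_edges.append([qubit_start_idx[i], node_idx])
--         node_idx2qubit_idx[node_idx] = [i]
--         node_idx += 1
--     return circuit_edges, node_idx2qubit_idx
-- ===== SOURCE B (Python) =====
-- def graph2hc(graph_edges, n_node):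
--     # Stateless formulation: sort edges once by jump distance, then compute each
--     # circuit edge's left endpoint directly as "the previous circuit node on that
--     # qubit line" by scanning the earlier sorted edges, with no dict of running
--     # qubit positions; node_idx2qubit_idx is produced by three independent passes.
--     es = sorted(graph_edges, key=lambda e: abs(e[1] - e[0]))
--     E = len(es)
--
--     def prev_node(v, t):
--         # previous circuit node on qubit line v before step t
--         p = v
--         for s in range(t):
--             if es[s][0] == v or es[s][1] == v:
--                 p = n_node + s
--         return p
--
--     circuit_edges = []
--     for t in range(E):
--         circuit_edges.append([prev_node(es[t][0], t), n_node + t])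
--         circuit_edges.append([prev_node(es[t][1], t), n_node + t])
--     for v in range(n_node):
--         circuit_edges.append([prev_node(v, E), n_node + E + v])
--
--     node_idx2qubit_idx = {v: [v] for v in range(n_node)}
--     for t in range(E):
--         node_idx2qubit_idx[n_node + t] = [es[t][0], es[t][1]]
--     for v in range(n_node):
--         node_idx2qubit_idx[n_node + E + v] = [v]
--     return circuit_edges, node_idx2qubit_idx
-- ===== Notes on version B (the rewrite author's own statement) =====
-- stated objective: alternative
-- what changed: Replaces A's dict-grouping-plus-sorted-keys and its incrementally maintained qubit_start_idx/node_idx state with one stable sort by jump distance and a stateless direct computation: each circuit edge's left endpoint is recomputed by scanning the earlier sorted edges for the last one touching that qubit line, and node_idx2qubit_idx is built by three independent passes.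
import Mathlib
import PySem

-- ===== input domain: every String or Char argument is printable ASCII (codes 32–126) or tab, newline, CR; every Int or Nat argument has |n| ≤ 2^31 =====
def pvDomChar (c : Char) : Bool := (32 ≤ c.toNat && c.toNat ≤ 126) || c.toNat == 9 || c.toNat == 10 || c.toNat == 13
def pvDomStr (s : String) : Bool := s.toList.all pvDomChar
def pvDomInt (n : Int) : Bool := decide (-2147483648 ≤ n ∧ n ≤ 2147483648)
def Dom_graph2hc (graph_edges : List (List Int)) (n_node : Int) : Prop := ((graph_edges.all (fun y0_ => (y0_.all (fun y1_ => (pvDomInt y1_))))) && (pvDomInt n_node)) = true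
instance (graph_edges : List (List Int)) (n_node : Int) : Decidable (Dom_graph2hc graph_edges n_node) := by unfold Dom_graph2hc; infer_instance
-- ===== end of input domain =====

-- B replaces A's dict-grouping-plus-sorted-keys and its running qubit_start_idx dict by
-- one stable sort and a stateless recomputation of each predecessor circuit node
-- (objective: alternative; not faster).

-- ===== PORT A =====
def graph2hc (graph_edges : List (List Int)) (n_node : Int) : List (List Int) × (List (Int × List Int)) :=
  -- jump2edge grouping loop
  let jump2edge : PySem.Dict Int (List (List Int)) :=
    graph_edges.foldl (fun d edge =>
      let j := |PySem.List.pyGetD edge 1 0 - PySem.List.pyGetD edge 0 0|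
      if !(d.contains j) then d.insert j [edge]
      else d.modify j [] (fun g => g ++ [edge])) PySem.Dict.empty
  -- qubit_start_idx / node_idx2qubit_idx initialisation loop
  let init : PySem.Dict Int Int × PySem.Dict Int (List Int) :=
    (PySem.List.pyRange 0 n_node 1).foldl
      (fun st i => (st.1.insert i i, st.2.insert i [i])) (PySem.Dict.empty, PySem.Dict.empty)
  let keys := PySem.List.sorted jump2edge.keys (fun x => x) false
  -- main nested loop; state = (circuit_edges, qubit_start_idx, node_idx2qubit_idx, node_idx)
  let st1 : List (List Int) × PySem.Dict Int Int × PySem.Dict Int (List Int) × Int :=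
    keys.foldl (fun st k =>
      (jump2edge.getD k []).foldl (fun st edge =>
        let e0 := PySem.List.pyGetD edge 0 0
        let e1 := PySem.List.pyGetD edge 1 0
        (st.1 ++ [[st.2.1.getD e0 0, st.2.2.2], [st.2.1.getD e1 0, st.2.2.2]],
         (st.2.1.insert e0 st.2.2.2).insert e1 st.2.2.2,
         st.2.2.1.insert st.2.2.2 [e0, e1],
         st.2.2.2 + 1)) st)
      ([], init.1, init.2, n_node)
  -- final per-node loop
  let st2 := (PySem.List.pyRange 0 n_node 1).foldl (fun st i =>
      (st.1 ++ [[st.2.1.getD i 0, st.2.2.2]], st.2.1, st.2.2.1.insert st.2.2.2 [i], st.2.2.2 + 1)) st1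
  (st2.1, st2.2.2.1.items)

-- ===== PORT B =====
-- es[s][0] / es[s][1] reads (indices always in range on admitted inputs)
def pvE0 (es : List (List Int)) (s : Int) : Int := PySem.List.pyGetD (PySem.List.pyGetD es s []) 0 0
def pvE1 (es : List (List Int)) (s : Int) : Int := PySem.List.pyGetD (PySem.List.pyGetD es s []) 1 0

-- prev_node(v, t): previous circuit node on qubit line v before step t (stateless scan)
def prevNode (es : List (List Int)) (n_node v t : Int) : Int :=
  (PySem.List.pyRange 0 t 1).foldl
    (fun p s => if pvE0 es s == v || pvE1 es s == v then n_node + s else p) v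

def graph2hc_alt (graph_edges : List (List Int)) (n_node : Int) : List (List Int) × (List (Int × List Int)) :=
  let es := PySem.List.sorted graph_edges
      (fun e => |PySem.List.pyGetD e 1 0 - PySem.List.pyGetD e 0 0|) false
  let E : Int := es.length
  -- circuit_edges: one loop over the edge positions, one over the nodes
  let circuit1 := (PySem.List.pyRange 0 E 1).foldl (fun acc t =>
      acc ++ [[prevNode es n_node (pvE0 es t) t, n_node + t],
              [prevNode es n_node (pvE1 es t) t, n_node + t]]) []
  let circuit := (PySem.List.pyRange 0 n_node 1).foldl (fun acc v =>
      acc ++ [[prevNode es n_node v E, n_node + E + v]]) circuit1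
  -- node_idx2qubit_idx: three independent passes
  let n2qa := (PySem.List.pyRange 0 n_node 1).foldl
      (fun d v => d.insert v [v]) (PySem.Dict.empty : PySem.Dict Int (List Int))
  let n2qb := (PySem.List.pyRange 0 E 1).foldl
      (fun d t => d.insert (n_node + t) [pvE0 es t, pvE1 es t]) n2qa
  let n2qc := (PySem.List.pyRange 0 n_node 1).foldl
      (fun d v => d.insert (n_node + E + v) [v]) n2qb
  (circuit, n2qc.items)

-- ===== PRECONDITION & SPEC =====
-- Pre_ excludes exactly the inputs on which the Python A raises: an edge shorter than two
-- entries (IndexError) or an endpoint outside range(n_node) (KeyError in qubit_start_idx).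
def Pre_graph2hc (graph_edges : List (List Int)) (n_node : Int) : Prop :=
  ∀ e ∈ graph_edges, 2 ≤ e.length ∧
    0 ≤ PySem.List.pyGetD e 0 0 ∧ PySem.List.pyGetD e 0 0 < n_node ∧
    0 ≤ PySem.List.pyGetD e 1 0 ∧ PySem.List.pyGetD e 1 0 < n_node
instance (graph_edges : List (List Int)) (n_node : Int) : Decidable (Pre_graph2hc graph_edges n_node) := by
  unfold Pre_graph2hc; infer_instance
def pvWitness_graph2hc : List (List Int) × Int := ([[0, 1], [1, 2], [0, 2]], 3)

def Spec_graph2hc (graph_edges : List (List Int)) (n_node : Int) (out : List (List Int) × (List (Int × List Int))) : Prop := out = graph2hc_alt graph_edges n_node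
instance (graph_edges : List (List Int)) (n_node : Int) (out : List (List Int) × (List (Int × List Int))) : Decidable (Spec_graph2hc graph_edges n_node out) := by unfold Spec_graph2hc; infer_instance

-- ===== CLAIM (what is proved, stated in full; the proofs are below) =====
def Claim_equal_graph2hc : Prop := ∀ (graph_edges : List (List Int)) (n_node : Int), Dom_graph2hc graph_edges n_node → Pre_graph2hc graph_edges n_node → Spec_graph2hc graph_edges n_node (graph2hc graph_edges n_node)

-- ===== LEMMAS AND PROOFS =====

-- A's main-loop and final-loop step functions, named for the proofs
def mstep (st : List (List Int) × PySem.Dict Int Int × PySem.Dict Int (List Int) × Int)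
    (edge : List Int) : List (List Int) × PySem.Dict Int Int × PySem.Dict Int (List Int) × Int :=
  let e0 := PySem.List.pyGetD edge 0 0
  let e1 := PySem.List.pyGetD edge 1 0
  (st.1 ++ [[st.2.1.getD e0 0, st.2.2.2], [st.2.1.getD e1 0, st.2.2.2]],
   (st.2.1.insert e0 st.2.2.2).insert e1 st.2.2.2,
   st.2.2.1.insert st.2.2.2 [e0, e1],
   st.2.2.2 + 1)

def fstep (st : List (List Int) × PySem.Dict Int Int × PySem.Dict Int (List Int) × Int)
    (i : Int) : List (List Int) × PySem.Dict Int Int × PySem.Dict Int (List Int) × Int :=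
  (st.1 ++ [[st.2.1.getD i 0, st.2.2.2]], st.2.1, st.2.2.1.insert st.2.2.2 [i], st.2.2.2 + 1)

-- reference form of A: the same bookkeeping as one flat fold over the key-sorted edge list
def flatRef (graph_edges : List (List Int)) (n_node : Int) : List (List Int) × (List (Int × List Int)) :=
  let es := PySem.List.sorted graph_edges
      (fun e => |PySem.List.pyGetD e 1 0 - PySem.List.pyGetD e 0 0|) false
  let qsi0 : PySem.Dict Int Int :=
    (PySem.List.pyRange 0 n_node 1).foldl (fun d i => d.insert i i) PySem.Dict.empty
  let n2q0 : PySem.Dict Int (List Int) :=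
    (PySem.List.pyRange 0 n_node 1).foldl (fun d i => d.insert i [i]) PySem.Dict.empty
  let st1 := es.foldl mstep ([], qsi0, n2q0, n_node)
  let st2 := (PySem.List.pyRange 0 n_node 1).foldl fstep st1
  (st2.1, st2.2.2.1.items)

-- insertBy passes over a prefix it is not 'before'
theorem insertBy_append_skip {α : Type} (before : α → α → Bool) (x : α) (ys zs : List α)
    (h : ∀ y ∈ ys, before x y = false) :
    PySem.List.insertBy before x (ys ++ zs) = ys ++ PySem.List.insertBy before x zs := by
  induction ys with
  | nil => simp
  | cons y ys ih =>
    have hy : before x y = false := h y (by simp)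
    simp [PySem.List.insertBy, hy, ih (fun y hy => h y (by simp [hy]))]

-- insertBy lands at the front of a block it is 'before'
theorem insertBy_all_before {α : Type} (before : α → α → Bool) (x : α) (zs : List α)
    (h : ∀ z ∈ zs, before x z = true) :
    PySem.List.insertBy before x zs = x :: zs := by
  cases zs with
  | nil => rfl
  | cons z zs => simp [PySem.List.insertBy, h z (by simp)]

theorem insertBy_flatMap_groups {α : Type} (key : α → Int) (e : α) (es : List α)
    (ks : List Int) (hks : ks.Pairwise (· < ·)) (he : key e ∈ ks) :
    PySem.List.insertBy (fun a b => decide (key a < key b)) e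
        (ks.flatMap fun k => es.filter (fun x => key x == k))
      = ks.flatMap fun k => (es ++ [e]).filter (fun x => key x == k) := by
  induction ks with
  | nil => simp at he
  | cons k ks ih =>
    have hpair : ∀ k' ∈ ks, k < k' := (List.pairwise_cons.mp hks).1
    have hGfalse : ∀ y ∈ es.filter (fun x => key x == k),
        (fun a b => decide (key a < key b)) e y = false := by
      intro y hy
      have hky : key y = k := by simpa using (List.of_mem_filter hy)
      rcases List.mem_cons.mp he with he | he
      · simp [hky, he]
      · have := hpair _ he
        simp [hky]; omega
    rcases eq_or_ne (key e) k with hk | hk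
    · have hRtrue : ∀ z ∈ ks.flatMap fun k' => es.filter (fun x => key x == k'),
          (fun a b => decide (key a < key b)) e z = true := by
        intro z hz
        rcases List.mem_flatMap.mp hz with ⟨k', hk', hzf⟩
        have : key z = k' := by simpa using (List.of_mem_filter hzf)
        have := hpair _ hk'
        simp [‹key z = k'›, hk]; omega
      rw [List.flatMap_cons, insertBy_append_skip _ _ _ _ hGfalse,
          insertBy_all_before _ _ _ hRtrue, List.flatMap_cons]
      have hgroups : ∀ k' ∈ ks, (es ++ [e]).filter (fun x => key x == k')
          = es.filter (fun x => key x == k') := by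
        intro k' hk'
        have := hpair _ hk'
        simp [List.filter_append]
        intro h; exfalso; omega
      rw [List.filter_append]
      simp only [List.filter_cons, List.filter_nil, hk, beq_self_eq_true]
      rw [List.flatMap_congr (fun k' hk' => hgroups k' hk')]
      simp
    · have he' : key e ∈ ks := by
        rcases List.mem_cons.mp he with he | he
        · exact absurd he hk
        · exact he
      rw [List.flatMap_cons, insertBy_append_skip _ _ _ _ hGfalse,
          ih (List.pairwise_cons.mp hks).2 he', List.flatMap_cons]
      congr 1
      simp [List.filter_append, hk]

-- a stable sort by key is the concatenation, in key order, of the key-groups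
theorem sorted_eq_flatMap_groups {α : Type} (key : α → Int) (es : List α)
    (ks : List Int) (hks : ks.Pairwise (· < ·)) (hmem : ∀ e ∈ es, key e ∈ ks) :
    ks.flatMap (fun k => es.filter (fun x => key x == k))
      = PySem.List.sorted es key false := by
  rw [PySem.List.sorted_eq_foldl_insertBy]
  induction es using List.reverseRecOn with
  | nil => simp
  | append_singleton es e ih =>
    rw [List.foldl_append, List.foldl_cons, List.foldl_nil,
        ← ih (fun x hx => hmem x (by simp [hx])),
        insertBy_flatMap_groups key e es ks hks (hmem e (by simp))]

-- splitting A's paired initialisation fold into two folds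
theorem foldl_pair_split {γ A B : Type} (l : List γ) (g1 : A → γ → A) (g2 : B → γ → B)
    (a : A) (b : B) :
    l.foldl (fun st i => (g1 st.1 i, g2 st.2 i)) (a, b) = (l.foldl g1 a, l.foldl g2 b) := by
  induction l generalizing a b with
  | nil => rfl
  | cons x l ih => simp [List.foldl_cons, ih]

-- the grouping loop's branch is exactly a modify
theorem group_step_eq (d : PySem.Dict Int (List (List Int))) (edge : List Int) :
    (let j := |PySem.List.pyGetD edge 1 0 - PySem.List.pyGetD edge 0 0|
     if !(d.contains j) then d.insert j [edge]
     else d.modify j [] (fun g => g ++ [edge]))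
    = d.modify (|PySem.List.pyGetD edge 1 0 - PySem.List.pyGetD edge 0 0|) [] (fun g => g ++ [edge]) := by
  set j := |PySem.List.pyGetD edge 1 0 - PySem.List.pyGetD edge 0 0|
  by_cases h : d.contains j
  · simp [h]
  · simp only [Bool.not_eq_true] at h
    simp [h, PySem.Dict.modify, PySem.Dict.getD_of_not_contains d _ h]

-- A equals the flat single-fold reference over the stable key-sorted edge list
theorem graph2hc_eq_flatRef (graph_edges : List (List Int)) (n_node : Int) :
    graph2hc graph_edges n_node = flatRef graph_edges n_node := by
  unfold graph2hc flatRef mstep fstep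
  -- 1. the grouping loop's branch is a modify
  have hstepeq : (fun (d : PySem.Dict Int (List (List Int))) (edge : List Int) =>
      let j := |PySem.List.pyGetD edge 1 0 - PySem.List.pyGetD edge 0 0|
      if !(d.contains j) then d.insert j [edge]
      else d.modify j [] (fun g => g ++ [edge]))
      = fun d edge => d.modify (|PySem.List.pyGetD edge 1 0 - PySem.List.pyGetD edge 0 0|) []
          (fun g => g ++ [edge]) :=
    funext fun d => funext fun edge => group_step_eq d edge
  -- 2. its lookups are the jump-groups, i.e. the filters of graph_edges
  have hget : ∀ k : Int, (graph_edges.foldl (fun d edge =>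
        d.modify (|PySem.List.pyGetD edge 1 0 - PySem.List.pyGetD edge 0 0|) []
          (fun g => g ++ [edge])) PySem.Dict.empty).getD k []
      = graph_edges.filter (fun x => |PySem.List.pyGetD x 1 0 - PySem.List.pyGetD x 0 0| == k) := by
    intro k
    have h := PySem.Dict.getD_foldl_modify_append
      (graph_edges.map (fun e => (|PySem.List.pyGetD e 1 0 - PySem.List.pyGetD e 0 0|, e)))
      PySem.Dict.empty k
    rw [List.foldl_map] at h
    rw [h]
    simp [List.filter_map, Function.comp_def]
  -- 3. its keys are the distinct jump values, in insertion order
  have hkeys : (graph_edges.foldl (fun d edge =>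
        d.modify (|PySem.List.pyGetD edge 1 0 - PySem.List.pyGetD edge 0 0|) []
          (fun g => g ++ [edge])) PySem.Dict.empty).keys
      = PySem.Set.ofList (graph_edges.map
          (fun e => |PySem.List.pyGetD e 1 0 - PySem.List.pyGetD e 0 0|)) := by
    have h := PySem.Dict.keys_foldl_modify_key graph_edges
      (fun e => |PySem.List.pyGetD e 1 0 - PySem.List.pyGetD e 0 0|) []
      (fun _ e => (fun g => g ++ [e])) PySem.Dict.empty
    rw [h, PySem.Dict.keys_empty]
    rfl
  -- 4. the sorted distinct keys, each expanded to its group, are the stable sort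
  have hsorted : (PySem.List.sorted (PySem.Set.ofList (graph_edges.map
          (fun e => |PySem.List.pyGetD e 1 0 - PySem.List.pyGetD e 0 0|))) (fun x => x) false).flatMap
        (fun k => graph_edges.filter
          (fun x => |PySem.List.pyGetD x 1 0 - PySem.List.pyGetD x 0 0| == k))
      = PySem.List.sorted graph_edges
          (fun e => |PySem.List.pyGetD e 1 0 - PySem.List.pyGetD e 0 0|) false :=
    sorted_eq_flatMap_groups _ graph_edges _
      (PySem.List.sorted_ofList_pairwise_lt _)
      (fun e he => by
        rw [PySem.List.mem_sorted, PySem.Set.mem_ofList]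
        exact List.mem_map_of_mem he)
  simp only [hstepeq, hkeys, hget, ← List.foldl_flatMap, hsorted]
  rw [foldl_pair_split (PySem.List.pyRange 0 n_node 1)
    (fun (d : PySem.Dict Int Int) i => d.insert i i)
    (fun (d : PySem.Dict Int (List Int)) i => d.insert i [i]) PySem.Dict.empty PySem.Dict.empty]


-- lookup after the identity-insert initialisation loop
theorem getD_foldl_insert_id (L : List Int) (d : PySem.Dict Int Int) (v : Int) :
    (L.foldl (fun d i => d.insert i i) d).getD v 0 = if v ∈ L then v else d.getD v 0 := by
  induction L generalizing d with
  | nil => simp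
  | cons x L ih =>
    rw [List.foldl_cons, ih]
    by_cases hv : v ∈ L
    · simp [hv]
    · by_cases hx : v = x
      · simp [hx]
      · simp [hv, hx, PySem.Dict.getD_insert]

theorem prevNode_zero (es : List (List Int)) (n v : Int) : prevNode es n v 0 = v := by
  simp [prevNode, PySem.List.pyRange_one_eq_nil (le_refl (0 : Int))]

theorem prevNode_succ (es : List (List Int)) (n v : Int) (t : Nat) :
    prevNode es n v ((t : Int) + 1)
      = if pvE0 es (t : Int) == v || pvE1 es (t : Int) == v then n + (t : Int)
        else prevNode es n v (t : Int) := by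
  unfold prevNode
  rw [PySem.List.pyRange_one_succ_right (by positivity : (0 : Int) ≤ (t : Int)),
      List.foldl_append, List.foldl_cons, List.foldl_nil]

-- closed forms of the circuit list and the node_idx2qubit_idx dict built by the main loop
def outS (es : List (List Int)) (n t : Int) : List (List Int) :=
  (PySem.List.pyRange 0 t 1).foldl (fun acc s =>
      acc ++ [[prevNode es n (pvE0 es s) s, n + s],
              [prevNode es n (pvE1 es s) s, n + s]]) []

def n2qS (es : List (List Int)) (n : Int) (d0 : PySem.Dict Int (List Int)) (t : Int) :
    PySem.Dict Int (List Int) :=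
  (PySem.List.pyRange 0 t 1).foldl (fun d s => d.insert (n + s) [pvE0 es s, pvE1 es s]) d0

theorem outS_succ (es : List (List Int)) (n : Int) (t : Nat) :
    outS es n ((t : Int) + 1)
      = outS es n (t : Int)
        ++ [[prevNode es n (pvE0 es (t : Int)) (t : Int), n + (t : Int)],
            [prevNode es n (pvE1 es (t : Int)) (t : Int), n + (t : Int)]] := by
  unfold outS
  rw [PySem.List.pyRange_one_succ_right (by positivity : (0 : Int) ≤ (t : Int)),
      List.foldl_append, List.foldl_cons, List.foldl_nil]

theorem n2qS_succ (es : List (List Int)) (n : Int) (d0 : PySem.Dict Int (List Int)) (t : Nat) :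
    n2qS es n d0 ((t : Int) + 1)
      = (n2qS es n d0 (t : Int)).insert (n + (t : Int)) [pvE0 es (t : Int), pvE1 es (t : Int)] := by
  unfold n2qS
  rw [PySem.List.pyRange_one_succ_right (by positivity : (0 : Int) ≤ (t : Int)),
      List.foldl_append, List.foldl_cons, List.foldl_nil]

-- invariant of A's main loop over the sorted edge list
theorem mainInv (es : List (List Int)) (n : Int)
    (hend : ∀ e ∈ es, 0 ≤ PySem.List.pyGetD e 0 0 ∧ PySem.List.pyGetD e 0 0 < n ∧
      0 ≤ PySem.List.pyGetD e 1 0 ∧ PySem.List.pyGetD e 1 0 < n)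
    (qsi0 : PySem.Dict Int Int) (n2q0 : PySem.Dict Int (List Int))
    (hq0 : ∀ v : Int, 0 ≤ v → v < n → qsi0.getD v 0 = v)
    (t : Nat) (ht : t ≤ es.length) :
    ((es.take t).foldl mstep ([], qsi0, n2q0, n)).1 = outS es n (t : Int) ∧
    (∀ v : Int, 0 ≤ v → v < n →
      ((es.take t).foldl mstep ([], qsi0, n2q0, n)).2.1.getD v 0 = prevNode es n v (t : Int)) ∧
    ((es.take t).foldl mstep ([], qsi0, n2q0, n)).2.2.1 = n2qS es n n2q0 (t : Int) ∧
    ((es.take t).foldl mstep ([], qsi0, n2q0, n)).2.2.2 = n + (t : Int) := by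
  induction t with
  | zero =>
    refine ⟨by simp [outS, PySem.List.pyRange_one_eq_nil (le_refl (0 : Int))], ?_,
      by simp [n2qS, PySem.List.pyRange_one_eq_nil (le_refl (0 : Int))], by simp⟩
    intro v h0 h1
    simp [hq0 v h0 h1, prevNode_zero]
  | succ t ih =>
    have htlt : t < es.length := by omega
    obtain ⟨h1, h2, h3, h4⟩ := ih (by omega)
    have htake : es.take (t + 1) = es.take t ++ [es[t]] := by
      rw [List.take_add_one, List.getElem?_eq_getElem htlt]; rfl
    have hedge : PySem.List.pyGetD es (t : Int) [] = es[t] := by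
      rw [PySem.List.pyGetD_natCast, List.getD_eq_getElem es [] htlt]
    have he0 : pvE0 es (t : Int) = PySem.List.pyGetD es[t] 0 0 := by
      rw [pvE0, hedge]
    have he1 : pvE1 es (t : Int) = PySem.List.pyGetD es[t] 1 0 := by
      rw [pvE1, hedge]
    have hb := hend es[t] (List.getElem_mem htlt)
    rw [htake, List.foldl_append, List.foldl_cons, List.foldl_nil]
    push_cast
    refine ⟨?_, ?_, ?_, ?_⟩
    · show _ ++ _ = _
      rw [outS_succ, h1, h4, he0, he1,
          h2 _ hb.1 hb.2.1, h2 _ hb.2.2.1 hb.2.2.2]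
    · intro v h0 hlt
      show (PySem.Dict.insert (PySem.Dict.insert _ _ _) _ _).getD v 0 = _
      rw [prevNode_succ, PySem.Dict.getD_insert, PySem.Dict.getD_insert, h4, he0, he1]
      by_cases hv1 : v = PySem.List.pyGetD es[t] 1 0
      · simp [hv1]
      · by_cases hv0 : v = PySem.List.pyGetD es[t] 0 0
        · simp [hv0]
        · have hbeq0 : (PySem.List.pyGetD es[t] 0 0 == v) = false := by
            simp; exact fun h => hv0 h.symm
          have hbeq1 : (PySem.List.pyGetD es[t] 1 0 == v) = false := by
            simp; exact fun h => hv1 h.symm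
          simp [hv1, hv0, hbeq0, hbeq1, h2 v h0 hlt]
    · show (PySem.Dict.insert _ _ _) = _
      rw [n2qS_succ, h3, h4, he0, he1]
    · show _ + 1 = _
      rw [h4]; ring

-- invariant of the final per-node loop (A's threaded form vs B's three independent folds)
theorem finalInv (P : Int → Int) (c : Int) :
    ∀ (m : Nat) (a b : Int), (b - a).toNat = m →
    ∀ (acc : List (List Int)) (qsi : PySem.Dict Int Int) (n2q : PySem.Dict Int (List Int)),
    (∀ i : Int, a ≤ i → i < b → qsi.getD i 0 = P i) →
    (PySem.List.pyRange a b 1).foldl fstep (acc, qsi, n2q, c + a)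
      = ((PySem.List.pyRange a b 1).foldl (fun o i => o ++ [[P i, c + i]]) acc,
         qsi,
         (PySem.List.pyRange a b 1).foldl (fun d i => d.insert (c + i) [i]) n2q,
         if a ≤ b then c + b else c + a) := by
  intro m
  induction m with
  | zero =>
    intro a b hm acc qsi n2q _
    have hba : b ≤ a := by omega
    rw [PySem.List.pyRange_one_eq_nil hba]
    rcases eq_or_lt_of_le hba with h | h
    · simp [h]
    · simp [List.foldl_nil, if_neg (by omega : ¬ a ≤ b)]
  | succ m ih =>
    intro a b hm acc qsi n2q hq
    have hab : a < b := by omega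
    rw [PySem.List.pyRange_one_cons hab, List.foldl_cons, List.foldl_cons, List.foldl_cons]
    show (PySem.List.pyRange (a+1) b 1).foldl fstep
        (acc ++ [[qsi.getD a 0, c + a]], qsi, n2q.insert (c + a) [a], c + a + 1) = _
    rw [hq a (le_refl a) hab]
    have hca : c + a + 1 = c + (a + 1) := by ring
    rw [hca, ih (a + 1) b (by omega) _ qsi _ (fun i h0 h1 => hq i (by omega) h1)]
    rw [if_pos (by omega : a + 1 ≤ b), if_pos (by omega : a ≤ b)]

-- the flat reference equals B
theorem flatRef_eq_alt (graph_edges : List (List Int)) (n_node : Int)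
    (hpre : Pre_graph2hc graph_edges n_node) :
    flatRef graph_edges n_node = graph2hc_alt graph_edges n_node := by
  unfold flatRef graph2hc_alt
  set es := PySem.List.sorted graph_edges
      (fun e => |PySem.List.pyGetD e 1 0 - PySem.List.pyGetD e 0 0|) false with hes
  have hend : ∀ e ∈ es, 0 ≤ PySem.List.pyGetD e 0 0 ∧ PySem.List.pyGetD e 0 0 < n_node ∧
      0 ≤ PySem.List.pyGetD e 1 0 ∧ PySem.List.pyGetD e 1 0 < n_node := by
    intro e he
    rw [hes, PySem.List.mem_sorted] at he
    obtain ⟨_, h⟩ := hpre e he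
    exact h
  set qsi0 : PySem.Dict Int Int :=
    (PySem.List.pyRange 0 n_node 1).foldl (fun d i => d.insert i i) PySem.Dict.empty with hqsi0
  set n2q0 : PySem.Dict Int (List Int) :=
    (PySem.List.pyRange 0 n_node 1).foldl (fun d i => d.insert i [i]) PySem.Dict.empty with hn2q0
  have hq0 : ∀ v : Int, 0 ≤ v → v < n_node → qsi0.getD v 0 = v := by
    intro v h0 h1
    rw [hqsi0, getD_foldl_insert_id]
    rw [if_pos ((PySem.List.mem_pyRange_one).2 ⟨h0, h1⟩)]
  obtain ⟨h1, h2, h3, h4⟩ := mainInv es n_node hend qsi0 n2q0 hq0 es.length (le_refl _)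
  rw [List.take_length] at h1 h2 h3 h4
  have hst1 : es.foldl mstep ([], qsi0, n2q0, n_node)
      = (outS es n_node es.length, (es.foldl mstep ([], qsi0, n2q0, n_node)).2.1,
         n2qS es n_node n2q0 es.length, n_node + (es.length : Int) + 0) :=
    Prod.ext h1 (Prod.ext rfl (Prod.ext h3 (by rw [h4]; ring)))
  have hfin := finalInv (fun i => prevNode es n_node i (es.length : Int))
      (n_node + (es.length : Int)) (n_node - 0).toNat 0 n_node rfl
      (outS es n_node es.length) (es.foldl mstep ([], qsi0, n2q0, n_node)).2.1
      (n2qS es n_node n2q0 es.length) (fun i hi0 hi1 => h2 i hi0 hi1)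
  dsimp only
  rw [hst1, hfin]
  rfl

-- ===== VERDICT (by name: the statement is the Claim_ definition above) =====
theorem graph2hc_spec : Claim_equal_graph2hc := by
  intro graph_edges n_node _ hpre
  unfold Spec_graph2hc
  rw [graph2hc_eq_flatRef, flatRef_eq_alt graph_edges n_node hpre]
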